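-- pv_equiv track=rewrite | github.com/sam189239/coding | string_prob.py | fun
-- ===== SOURCE A (Python) =====
-- def flow(a,b):
--     ans=0
--     for i in range(len(a)):
--         ans+=(a[i]!=b[i])
--     return ans
--
-- def fun(A,B,C):
--
--     memor={}
--     def rev(i,j):
--         if (i-1,j+1) in memor:
--             ans=memor[(i-1,j+1)]-(A[i-1]!=B[j+1])-(B[i-1]!=A[j+1])
--         elif (i+1,j-1) in memor:
--             ans=memor[(i+1,j-1)]+(A[i]!=B[j])+(B[i]!=A[j])
--         else:
--             ans=flow(A[i:j+1],B[i:j+1][-1::-1])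
--         memor[(i,j)]=ans
--         return ans
--
--
--
--
--     memo={}
--     def forw(i,j):
--         if (i,j+1) in memo:
--             ans=memo[(i,j+1)]-(A[j+1]!=B[j+1])
--         elif (i+1,j) in memo:
--             ans=memo[(i+1,j)]+(A[i]!=B[i])
--         elif (i-1,j) in memo:
--             ans=memo[(i-1,j)]-(A[i-1]!=B[i-1])
--         elif (i,j-1) in memo:
--             ans=memo[(i,j-1)]+(A[j]!=B[j])
--         else:
--             ans=flow(A[i:j+1],B[i:j+1])
--         memo[(i,j)]=ans
--         return ans
--
--     ans={}
--     for i in range(0,len(A)):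
--         for j in range(i,len(A)):
--             k=(forw(i,j)-rev(i,j))
--             ans[k]=(i,j)
--     res=max(ans)
--     if res>C:
--         return True,res,ans[res]
--     return False,0,(0,0)
-- ===== SOURCE B (Python) =====
-- def fun(A, B, C):
--     n = len(A)
--     best = None  # (k, (i, j)): running max of k, last (i, j) attaining it
--     for i in range(n):
--         for j in range(i, n):
--             k = 0
--             for t in range(j - i + 1):
--                 k += (A[i + t] != B[i + t]) - (A[i + t] != B[j - t])
--             if best is None or k >= best[0]:
--                 best = (k, (i, j))
--     if best is not None and best[0] > C:
--         return True, best[0], best[1]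
--     return False, 0, (0, 0)
-- ===== Notes on version B (the rewrite author's own statement) =====
-- stated objective: simpler
-- what changed: Replaced the two memoized neighbour-delta helpers and their dicts, the ans[k]=(i,j) dict and the final max(ans) lookup by a direct three-line summation of forward-minus-reversed mismatches per substring and a running (best k, last pair) maximum.
import Mathlib
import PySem

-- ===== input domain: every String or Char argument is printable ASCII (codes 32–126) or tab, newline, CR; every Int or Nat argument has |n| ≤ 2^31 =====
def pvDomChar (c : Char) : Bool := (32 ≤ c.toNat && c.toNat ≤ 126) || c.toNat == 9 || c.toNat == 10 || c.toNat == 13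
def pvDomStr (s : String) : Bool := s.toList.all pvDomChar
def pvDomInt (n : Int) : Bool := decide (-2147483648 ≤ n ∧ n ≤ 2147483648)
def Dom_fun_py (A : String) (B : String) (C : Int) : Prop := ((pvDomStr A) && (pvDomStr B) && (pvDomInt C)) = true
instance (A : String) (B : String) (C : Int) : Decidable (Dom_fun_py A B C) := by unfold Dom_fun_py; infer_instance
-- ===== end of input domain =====

-- B replaces A's two memoized neighbour-delta helpers, its ans[k]=(i,j) dict and the
-- final max(ans) scan by a direct per-substring summation and a running maximum: simpler.

-- Total Python indexing shim shared by both ports: s[i]; the default is never reached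
-- on inputs admitted by Pre_fun_py (Python raises exactly where pyGet? is none).
def pvGet (xs : List Char) (i : Int) : Char := PySem.List.pyGetD xs i ' '

-- ===== PORT A =====

-- helper flow(a, b): Hamming distance of equal-length strings (b[i] raises when b is
-- shorter than a: those inputs are excluded by Pre_fun_py)
def flowP (a b : List Char) : Int :=
  (PySem.List.pyRange 0 (a.length : Int) 1).foldl
    (fun ans i => ans + (if pvGet a i ≠ pvGet b i then 1 else 0)) 0

-- rev(i, j): body of A's memoized closure; the dict 'memor' is threaded explicitly
def revStep (la lb : List Char) (memor : PySem.Dict (Int × Int) Int) (i j : Int) :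
    Int × PySem.Dict (Int × Int) Int :=
  let ans :=
    match memor.get? (i - 1, j + 1) with
    | some v => v - (if pvGet la (i - 1) ≠ pvGet lb (j + 1) then 1 else 0)
                  - (if pvGet lb (i - 1) ≠ pvGet la (j + 1) then 1 else 0)
    | none =>
      match memor.get? (i + 1, j - 1) with
      | some v => v + (if pvGet la i ≠ pvGet lb j then 1 else 0)
                    + (if pvGet lb i ≠ pvGet la j then 1 else 0)
      | none =>
          flowP (PySem.List.slice la (some i) (some (j + 1)))
            ((PySem.List.slice? (PySem.List.slice lb (some i) (some (j + 1)))
              (some (-1)) none (-1)).getD [])   -- B[i:j+1][-1::-1]; step ≠ 0, so never none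
  (ans, memor.insert (i, j) ans)

-- forw(i, j): body of A's second memoized closure, dict 'memo' threaded explicitly
def forwStep (la lb : List Char) (memo : PySem.Dict (Int × Int) Int) (i j : Int) :
    Int × PySem.Dict (Int × Int) Int :=
  let ans :=
    match memo.get? (i, j + 1) with
    | some v => v - (if pvGet la (j + 1) ≠ pvGet lb (j + 1) then 1 else 0)
    | none =>
      match memo.get? (i + 1, j) with
      | some v => v + (if pvGet la i ≠ pvGet lb i then 1 else 0)
      | none =>
        match memo.get? (i - 1, j) with
        | some v => v - (if pvGet la (i - 1) ≠ pvGet lb (i - 1) then 1 else 0)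
        | none =>
          match memo.get? (i, j - 1) with
          | some v => v + (if pvGet la j ≠ pvGet lb j then 1 else 0)
          | none =>
            flowP (PySem.List.slice la (some i) (some (j + 1)))
              (PySem.List.slice lb (some i) (some (j + 1)))
  (ans, memo.insert (i, j) ans)

def fun_py (A : String) (B : String) (C : Int) : Bool × Int × (Int × Int) :=
  let la := A.toList
  let lb := B.toList
  let st := (PySem.List.pyRange 0 (la.length : Int) 1).foldl
    (fun st i =>
      (PySem.List.pyRange i (la.length : Int) 1).foldl
        (fun st j =>
          let fr := forwStep la lb st.1 i j
          let rr := revStep la lb st.2.1 i j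
          (fr.2, rr.2, st.2.2.insert (fr.1 - rr.1) (i, j)))
        st)
    ((PySem.Dict.empty, PySem.Dict.empty, PySem.Dict.empty) :
      PySem.Dict (Int × Int) Int × PySem.Dict (Int × Int) Int × PySem.Dict Int (Int × Int))
  match PySem.List.max? st.2.2.keys (fun x => x) with
  | none => (false, 0, (0, 0))   -- Python: max of empty dict raises ValueError; excluded by Pre_
  | some res => if res > C then (true, res, st.2.2.getD res (0, 0)) else (false, 0, (0, 0))

-- ===== PORT B =====
def fun_py_alt (A : String) (B : String) (C : Int) : Bool × Int × (Int × Int) :=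
  let la := A.toList
  let lb := B.toList
  let n : Int := (la.length : Int)
  let best := (PySem.List.pyRange 0 n 1).foldl
    (fun best i =>
      (PySem.List.pyRange i n 1).foldl
        (fun best j =>
          let k := (PySem.List.pyRange 0 (j - i + 1) 1).foldl
            (fun k t =>
              k + ((if pvGet la (i + t) ≠ pvGet lb (i + t) then 1 else 0)
                   - (if pvGet la (i + t) ≠ pvGet lb (j - t) then 1 else 0))) 0
          match best with
          | none => some (k, (i, j))
          | some b => if b.1 ≤ k then some (k, (i, j)) else some b)
        best)
    (none : Option (Int × (Int × Int)))
  match best with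
  | some b => if b.1 > C then (true, b.1, b.2) else (false, 0, (0, 0))
  | none => (false, 0, (0, 0))

-- ===== PRECONDITION & SPEC =====
-- Pre_ excludes exactly the inputs on which the Python A raises: A == '' (ValueError from
-- max of an empty dict) and len(B) < len(A) (IndexError inside flow).
def Pre_fun_py (A : String) (B : String) (C : Int) : Prop :=
  A.toList ≠ [] ∧ A.toList.length ≤ B.toList.length
instance (A : String) (B : String) (C : Int) : Decidable (Pre_fun_py A B C) := by
  unfold Pre_fun_py; infer_instance
def pvWitness_fun_py : String × String × Int := ("ab", "ba", 0)

def Spec_fun_py (A : String) (B : String) (C : Int) (out : Bool × Int × (Int × Int)) : Prop :=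
  out = fun_py_alt A B C
instance (A : String) (B : String) (C : Int) (out : Bool × Int × (Int × Int)) :
    Decidable (Spec_fun_py A B C out) := by unfold Spec_fun_py; infer_instance

-- ===== CLAIM (what is proved, stated in full; the proofs are below) =====
def Claim_equal_fun_py : Prop := ∀ (A : String) (B : String) (C : Int),
  Dom_fun_py A B C → Pre_fun_py A B C → Spec_fun_py A B C (fun_py A B C)

-- ===== LEMMAS AND PROOFS =====

-- the mathematical per-cell values: number of forward / reversed mismatches on [i, j]
def pvMis (la lb : List Char) (p q : Nat) : Int :=
  if la.getD p ' ' ≠ lb.getD q ' ' then 1 else 0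
def pvFw (la lb : List Char) (i j : Nat) : Int :=
  ((List.range (j + 1 - i)).map (fun t => pvMis la lb (i + t) (i + t))).sum
def pvRv (la lb : List Char) (i j : Nat) : Int :=
  ((List.range (j + 1 - i)).map (fun t => pvMis la lb (i + t) (j - t))).sum

-- peeling identities
lemma pvFw_top (la lb : List Char) (i j : Nat) (h : i ≤ j + 1) :
    pvFw la lb i (j + 1) = pvFw la lb i j + pvMis la lb (j + 1) (j + 1) := by
  unfold pvFw
  rw [show j + 1 + 1 - i = (j + 1 - i) + 1 by omega, List.range_succ]
  simp
  rw [show i + (j + 1 - i) = j + 1 by omega]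

lemma pvFw_bot (la lb : List Char) (i j : Nat) (h : i ≤ j) :
    pvFw la lb i j = pvMis la lb i i + pvFw la lb (i + 1) j := by
  unfold pvFw
  rw [show j + 1 - i = (j - i) + 1 by omega, List.range_succ_eq_map]
  simp [List.map_map, Function.comp_def]
  congr 1
  apply List.map_congr_left
  intro t ht
  simp at ht
  congr 1 <;> omega

lemma pvRv_peel2 (la lb : List Char) (i j : Nat) (h : i < j) :
    pvRv la lb i j = pvMis la lb i j + pvMis la lb j i + pvRv la lb (i + 1) (j - 1) := by
  unfold pvRv
  rw [show j + 1 - i = ((j - i - 1) + 1) + 1 by omega, List.range_succ, List.range_succ_eq_map]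
  simp [List.map_map, Function.comp_def]
  rw [show i + ((j - i - 1) + 1) = j by omega, show j - ((j-i-1)+1) = i by omega,
      show j - 1 - i = j - i - 1 by omega]
  have : (List.map (fun t => pvMis la lb (i + (t + 1)) (j - (t + 1))) (List.range (j - i - 1)))
      = (List.map (fun t => pvMis la lb (i + 1 + t) (j - 1 - t)) (List.range (j - i - 1))) := by
    apply List.map_congr_left
    intro t ht
    simp at ht
    congr 1 <;> omega
  rw [this]
  ring

-- flow as a plain sum over positions
lemma flowP_eq_sum (a b : List Char) :
    flowP a b = ((List.range a.length).map
      (fun t => if a.getD t ' ' ≠ b.getD t ' ' then (1:Int) else 0)).sum := by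
  unfold flowP
  rw [PySem.List.pyRange_one, List.foldl_map,
      PySem.List.foldl_add (g := fun t : Nat =>
        if pvGet a ((0:Int) + (t:Int)) ≠ pvGet b ((0:Int) + (t:Int)) then (1:Int) else 0)]
  rw [zero_add]
  simp only [Int.sub_zero, Int.toNat_natCast]
  apply congrArg
  apply List.map_congr_left
  intro t ht
  simp [pvGet]

-- getD of the slice in terms of the original list
lemma getD_slice (xs : List Char) (i j t : Nat) (ht : t < j + 1 - i) (hj : j < xs.length) :
    ((xs.drop i).take (j + 1 - i)).getD t ' ' = xs.getD (i + t) ' ' := by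
  have h1 : t < ((xs.drop i).take (j + 1 - i)).length := by
    simp [List.length_take, List.length_drop]; omega
  have h2 : i + t < xs.length := by omega
  rw [List.getD_eq_getElem?_getD, List.getD_eq_getElem?_getD,
      List.getElem?_eq_getElem h1, List.getElem?_eq_getElem h2]
  simp

-- the direct flow computations on slices
lemma pvFlow_forw (la lb : List Char) (i j : Nat) (_hij : i ≤ j) (hj : j < la.length)
    (hlen : la.length ≤ lb.length) :
    flowP (PySem.List.slice la (some (i : Int)) (some ((j : Int) + 1)))
      (PySem.List.slice lb (some (i : Int)) (some ((j : Int) + 1))) = pvFw la lb i j := by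
  have hc : ((j : Int) + 1) = ((j + 1 : Nat) : Int) := by push_cast; ring
  rw [hc, PySem.List.slice_natCast, PySem.List.slice_natCast, flowP_eq_sum]
  have hlenA : ((la.drop i).take (j + 1 - i)).length = j + 1 - i := by
    simp [List.length_take, List.length_drop]; omega
  rw [hlenA]
  unfold pvFw
  apply congrArg
  apply List.map_congr_left
  intro t ht
  simp only [List.mem_range] at ht
  rw [getD_slice la i j t ht hj, getD_slice lb i j t ht (by omega)]
  rfl

lemma pvSliceRev (xs : List Char) :
    PySem.List.slice? xs (some (-1)) none (-1) = some xs.reverse := by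
  have h : PySem.List.sliceIndices xs.length (some (-1)) none (-1)
      = PySem.List.sliceIndices xs.length none none (-1) := by
    simp only [PySem.List.sliceIndices]
    norm_num
    omega
  rw [PySem.List.slice?, h, ← PySem.List.slice?, PySem.List.slice?_none_none_neg_one]

lemma pvFlow_rev (la lb : List Char) (i j : Nat) (hij : i ≤ j) (hj : j < la.length)
    (hlen : la.length ≤ lb.length) :
    flowP (PySem.List.slice la (some (i : Int)) (some ((j : Int) + 1)))
      (PySem.List.slice lb (some (i : Int)) (some ((j : Int) + 1))).reverse = pvRv la lb i j := by
  have hc : ((j : Int) + 1) = ((j + 1 : Nat) : Int) := by push_cast; ring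
  rw [hc, PySem.List.slice_natCast, PySem.List.slice_natCast, flowP_eq_sum]
  have hlenA : ((la.drop i).take (j + 1 - i)).length = j + 1 - i := by
    simp [List.length_take, List.length_drop]; omega
  have hlenB : ((lb.drop i).take (j + 1 - i)).length = j + 1 - i := by
    simp [List.length_take, List.length_drop]; omega
  rw [hlenA]
  unfold pvRv
  apply congrArg
  apply List.map_congr_left
  intro t ht
  simp only [List.mem_range] at ht
  have hrev : ((lb.drop i).take (j + 1 - i)).reverse.getD t ' ' = lb.getD (j - t) ' ' := by
    have h1 : t < ((lb.drop i).take (j + 1 - i)).reverse.length := by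
      simp only [List.length_reverse]; omega
    rw [List.getD_eq_getElem?_getD, List.getElem?_eq_getElem h1]
    rw [List.getElem_reverse]
    have := getD_slice lb i j (j - i - t) (by omega) (by omega)
    rw [List.getD_eq_getElem?_getD, List.getElem?_eq_getElem (by omega)] at this
    simp only [Option.getD_some] at this ⊢
    simp only [hlenB]
    simp only [show j + 1 - i - 1 - t = j - i - t from by omega]
    rw [this, show i + (j - i - t) = j - t by omega]
  rw [getD_slice la i j t ht hj, hrev]
  rfl

-- dict invariants of A's loop, and the relation to B's running best
def pvInvF (la lb : List Char) (d : PySem.Dict (Int × Int) Int) : Prop :=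
  ∀ p v, d.get? p = some v → ∃ a b : Nat, p = ((a : Int), (b : Int)) ∧ a ≤ b ∧ b < la.length ∧
    v = pvFw la lb a b
def pvInvR (la lb : List Char) (d : PySem.Dict (Int × Int) Int) : Prop :=
  ∀ p v, d.get? p = some v → ∃ a b : Nat, p = ((a : Int), (b : Int)) ∧ a ≤ b ∧ b < la.length ∧
    v = pvRv la lb a b
def pvInvB (d : PySem.Dict Int (Int × Int)) (best : Option (Int × (Int × Int))) : Prop :=
  match best with
  | none => d = PySem.Dict.empty
  | some b => d.get? b.1 = some b.2 ∧ b.1 ∈ d.keys ∧ (∀ y ∈ d.keys, y ≤ b.1)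

lemma pvGet_nat (xs : List Char) (t : Nat) : pvGet xs (t : Int) = xs.getD t ' ' := by
  simp [pvGet, pysem]

lemma pvForwStep_eq (la lb : List Char) (memo : PySem.Dict (Int × Int) Int) (i j : Nat)
    (hij : i ≤ j) (hj : j < la.length) (hlen : la.length ≤ lb.length)
    (hInv : pvInvF la lb memo) :
    forwStep la lb memo (i : Int) (j : Int)
      = (pvFw la lb i j, memo.insert ((i : Int), (j : Int)) (pvFw la lb i j)) := by
  have e1 : (j : Int) + 1 = ((j + 1 : Nat) : Int) := by push_cast; ring
  unfold forwStep
  cases hm1 : memo.get? ((i : Int), (j : Int) + 1) with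
  | some v =>
    obtain ⟨a, b, hp, hab, hb, hv⟩ := hInv _ _ hm1
    have hpa : (i : Int) = (a : Int) := congrArg Prod.fst hp
    have hpb : (j : Int) + 1 = (b : Int) := congrArg Prod.snd hp
    have ha : a = i := by omega
    have hbv : b = j + 1 := by omega
    rw [ha, hbv] at hv
    simp only [e1, pvGet_nat]
    have hval : v - (if la.getD (j+1) ' ' ≠ lb.getD (j+1) ' ' then (1:Int) else 0)
        = pvFw la lb i j := by
      rw [hv, pvFw_top la lb i j (by omega)]
      unfold pvMis
      ring
    rw [hval]
  | none =>
  cases hm2 : memo.get? ((i : Int) + 1, (j : Int)) with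
  | some v =>
    obtain ⟨a, b, hp, hab, hb, hv⟩ := hInv _ _ hm2
    have hpa : (i : Int) + 1 = (a : Int) := congrArg Prod.fst hp
    have hpb : (j : Int) = (b : Int) := congrArg Prod.snd hp
    have ha : a = i + 1 := by omega
    have hbv : b = j := by omega
    rw [ha, hbv] at hv
    have e2 : (i : Int) + 1 = ((i + 1 : Nat) : Int) := by push_cast; ring
    simp only [pvGet_nat]
    have hval : v + (if la.getD i ' ' ≠ lb.getD i ' ' then (1:Int) else 0)
        = pvFw la lb i j := by
      rw [hv, pvFw_bot la lb i j (by omega)]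
      unfold pvMis
      ring
    rw [hval]
  | none =>
  cases hm3 : memo.get? ((i : Int) - 1, (j : Int)) with
  | some v =>
    obtain ⟨a, b, hp, hab, hb, hv⟩ := hInv _ _ hm3
    have hpa : (i : Int) - 1 = (a : Int) := congrArg Prod.fst hp
    have hpb : (j : Int) = (b : Int) := congrArg Prod.snd hp
    have hi1 : 1 ≤ i := by omega
    have ha : a = i - 1 := by omega
    have hbv : b = j := by omega
    rw [ha, hbv] at hv
    have e3 : (i : Int) - 1 = ((i - 1 : Nat) : Int) := by omega
    simp only [e3, pvGet_nat]
    have hval : v - (if la.getD (i-1) ' ' ≠ lb.getD (i-1) ' ' then (1:Int) else 0)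
        = pvFw la lb i j := by
      rw [hv, pvFw_bot la lb (i-1) j (by omega), show i - 1 + 1 = i by omega]
      unfold pvMis
      ring
    rw [hval]
  | none =>
  cases hm4 : memo.get? ((i : Int), (j : Int) - 1) with
  | some v =>
    obtain ⟨a, b, hp, hab, hb, hv⟩ := hInv _ _ hm4
    have hpa : (i : Int) = (a : Int) := congrArg Prod.fst hp
    have hpb : (j : Int) - 1 = (b : Int) := congrArg Prod.snd hp
    have hj1 : 1 ≤ j := by omega
    have ha : a = i := by omega
    have hbv : b = j - 1 := by omega
    rw [ha, hbv] at hv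
    simp only [pvGet_nat]
    have hval : v + (if la.getD j ' ' ≠ lb.getD j ' ' then (1:Int) else 0)
        = pvFw la lb i j := by
      rw [hv, show j = (j - 1) + 1 from by omega, pvFw_top la lb i (j-1) (by omega),
          show j - 1 + 1 = j from by omega]
      unfold pvMis
      ring
    rw [hval]
  | none =>
    rw [pvFlow_forw la lb i j hij hj hlen]

lemma pvMis_swap (la lb : List Char) (p q : Nat) :
    (if lb.getD q ' ' ≠ la.getD p ' ' then (1:Int) else 0) = pvMis la lb p q := by
  unfold pvMis
  by_cases h : la.getD p ' ' = lb.getD q ' ' <;> simp [h, Ne, eq_comm] <;> simp [h]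

lemma pvRevStep_eq (la lb : List Char) (memor : PySem.Dict (Int × Int) Int) (i j : Nat)
    (hij : i ≤ j) (hj : j < la.length) (hlen : la.length ≤ lb.length)
    (hInv : pvInvR la lb memor) :
    revStep la lb memor (i : Int) (j : Int)
      = (pvRv la lb i j, memor.insert ((i : Int), (j : Int)) (pvRv la lb i j)) := by
  have e1 : (j : Int) + 1 = ((j + 1 : Nat) : Int) := by push_cast; ring
  unfold revStep
  cases hm1 : memor.get? ((i : Int) - 1, (j : Int) + 1) with
  | some v =>
    obtain ⟨a, b, hp, hab, hb, hv⟩ := hInv _ _ hm1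
    have hpa : (i : Int) - 1 = (a : Int) := congrArg Prod.fst hp
    have hpb : (j : Int) + 1 = (b : Int) := congrArg Prod.snd hp
    have hi1 : 1 ≤ i := by omega
    have ha : a = i - 1 := by omega
    have hbv : b = j + 1 := by omega
    rw [ha, hbv] at hv
    have e3 : (i : Int) - 1 = ((i - 1 : Nat) : Int) := by omega
    simp only [e1, e3, pvGet_nat]
    have hval : v - (if la.getD (i-1) ' ' ≠ lb.getD (j+1) ' ' then (1:Int) else 0)
        - (if lb.getD (i-1) ' ' ≠ la.getD (j+1) ' ' then (1:Int) else 0)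
        = pvRv la lb i j := by
      rw [pvMis_swap la lb (j+1) (i-1), hv, pvRv_peel2 la lb (i-1) (j+1) (by omega),
          show i - 1 + 1 = i from by omega, show j + 1 - 1 = j from by omega]
      unfold pvMis
      ring
    rw [hval]
  | none =>
  cases hm2 : memor.get? ((i : Int) + 1, (j : Int) - 1) with
  | some v =>
    obtain ⟨a, b, hp, hab, hb, hv⟩ := hInv _ _ hm2
    have hpa : (i : Int) + 1 = (a : Int) := congrArg Prod.fst hp
    have hpb : (j : Int) - 1 = (b : Int) := congrArg Prod.snd hp
    have hj1 : 1 ≤ j := by omega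
    have ha : a = i + 1 := by omega
    have hbv : b = j - 1 := by omega
    rw [ha, hbv] at hv
    simp only [pvGet_nat]
    have hval : v + (if la.getD i ' ' ≠ lb.getD j ' ' then (1:Int) else 0)
        + (if lb.getD i ' ' ≠ la.getD j ' ' then (1:Int) else 0)
        = pvRv la lb i j := by
      rw [pvMis_swap la lb j i, hv, pvRv_peel2 la lb i j (by omega)]
      unfold pvMis
      ring
    rw [hval]
  | none =>
    simp only []
    rw [pvSliceRev, Option.getD_some, pvFlow_rev la lb i j hij hj hlen]

lemma pvInvF_insert (la lb : List Char) (d : PySem.Dict (Int × Int) Int) (i j : Nat)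
    (hij : i ≤ j) (hj : j < la.length) (hInv : pvInvF la lb d) :
    pvInvF la lb (d.insert ((i : Int), (j : Int)) (pvFw la lb i j)) := by
  intro p v hpv
  by_cases hk : p = ((i : Int), (j : Int))
  · subst hk
    rw [PySem.Dict.get?_insert_self] at hpv
    exact ⟨i, j, rfl, hij, hj, (Option.some.inj hpv).symm⟩
  · rw [PySem.Dict.get?_insert_of_ne _ _ hk] at hpv
    exact hInv p v hpv

lemma pvInvR_insert (la lb : List Char) (d : PySem.Dict (Int × Int) Int) (i j : Nat)
    (hij : i ≤ j) (hj : j < la.length) (hInv : pvInvR la lb d) :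
    pvInvR la lb (d.insert ((i : Int), (j : Int)) (pvRv la lb i j)) := by
  intro p v hpv
  by_cases hk : p = ((i : Int), (j : Int))
  · subst hk
    rw [PySem.Dict.get?_insert_self] at hpv
    exact ⟨i, j, rfl, hij, hj, (Option.some.inj hpv).symm⟩
  · rw [PySem.Dict.get?_insert_of_ne _ _ hk] at hpv
    exact hInv p v hpv

-- B's inner summation loop computes pvFw - pvRv
lemma pvKB_eq (la lb : List Char) (i j : Nat) (hij : i ≤ j) :
    (PySem.List.pyRange 0 ((j : Int) - (i : Int) + 1) 1).foldl
      (fun k t =>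
        k + ((if pvGet la ((i : Int) + t) ≠ pvGet lb ((i : Int) + t) then 1 else 0)
             - (if pvGet la ((i : Int) + t) ≠ pvGet lb ((j : Int) - t) then 1 else 0))) 0
      = pvFw la lb i j - pvRv la lb i j := by
  have e1 : (j : Int) - (i : Int) + 1 = ((j - i + 1 : Nat) : Int) := by omega
  rw [e1, PySem.List.pyRange_one, List.foldl_map,
      PySem.List.foldl_add (g := fun t : Nat =>
        ((if pvGet la ((i : Int) + ((0:Int) + (t : Int))) ≠ pvGet lb ((i : Int) + ((0:Int) + (t : Int))) then (1:Int) else 0)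
         - (if pvGet la ((i : Int) + ((0:Int) + (t : Int))) ≠ pvGet lb ((j : Int) - ((0:Int) + (t : Int))) then (1:Int) else 0))),
      zero_add]
  simp only [Int.sub_zero, Int.toNat_natCast, zero_add]
  have hsum : ∀ l : List Nat,
      (l.map (fun (t : Nat) =>
        ((if pvGet la ((i : Int) + (t : Int)) ≠ pvGet lb ((i : Int) + (t : Int)) then (1:Int) else 0)
         - (if pvGet la ((i : Int) + (t : Int)) ≠ pvGet lb ((j : Int) - (t : Int)) then (1:Int) else 0)))).sum
      = (l.map (fun (t : Nat) =>
          (if pvGet la ((i : Int) + (t : Int)) ≠ pvGet lb ((i : Int) + (t : Int)) then (1:Int) else 0))).sum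
        - (l.map (fun (t : Nat) =>
          (if pvGet la ((i : Int) + (t : Int)) ≠ pvGet lb ((j : Int) - (t : Int)) then (1:Int) else 0))).sum := by
    intro l
    induction l with
    | nil => simp
    | cons x xs ih => simp only [List.map_cons, List.sum_cons, ih]; ring
  rw [hsum (List.range (j - i + 1))]
  unfold pvFw pvRv
  rw [show j + 1 - i = j - i + 1 by omega]
  congr 1
  · apply congrArg
    apply List.map_congr_left
    intro t ht
    simp only [List.mem_range] at ht
    rw [show (i : Int) + (t : Int) = ((i + t : Nat) : Int) by push_cast; ring, pvGet_nat, pvGet_nat]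
    rfl
  · apply congrArg
    apply List.map_congr_left
    intro t ht
    simp only [List.mem_range] at ht
    rw [show (i : Int) + (t : Int) = ((i + t : Nat) : Int) by push_cast; ring,
        show (j : Int) - (t : Int) = ((j - t : Nat) : Int) by omega, pvGet_nat, pvGet_nat]
    rfl

-- nested for-loops as one fold over the flattened list of index pairs
lemma pvFoldlNested {σ α β : Type} (l : List α) (g : α → List β) (f : σ → α → β → σ) (init : σ) :
    l.foldl (fun st a => (g a).foldl (fun st b => f st a b) st) init
      = (l.flatMap (fun a => (g a).map (fun b => (a, b)))).foldl (fun st p => f st p.1 p.2) init := by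
  induction l generalizing init with
  | nil => rfl
  | cons a l ih =>
    simp only [List.flatMap_cons, List.foldl_append, List.foldl_cons, List.foldl_map]
    rw [ih]

def pvBestStep (best : Option (Int × (Int × Int))) (k : Int) (p : Int × Int) :
    Option (Int × (Int × Int)) :=
  match best with
  | none => some (k, p)
  | some b => if b.1 ≤ k then some (k, p) else some b

lemma pvInvB_step (d : PySem.Dict Int (Int × Int)) (best : Option (Int × (Int × Int)))
    (k : Int) (p : Int × Int) (h : pvInvB d best) :
    pvInvB (d.insert k p) (pvBestStep best k p) := by
  unfold pvBestStep
  cases best with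
  | none =>
    unfold pvInvB at h ⊢
    subst h
    refine ⟨PySem.Dict.get?_insert_self _ _ _, ?_, ?_⟩
    · rw [← PySem.Dict.contains_iff_mem_keys]
      exact PySem.Dict.contains_insert_self _ _ _
    · intro y hy
      rw [← PySem.Dict.contains_iff_mem_keys, PySem.Dict.contains_insert] at hy
      simp [PySem.Dict.empty] at hy
      omega
  | some b =>
    obtain ⟨hget, hmem, hmax⟩ := h
    by_cases hle : b.1 ≤ k
    · simp only [hle, if_pos]
      refine ⟨PySem.Dict.get?_insert_self _ _ _, ?_, ?_⟩
      · rw [← PySem.Dict.contains_iff_mem_keys]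
        exact PySem.Dict.contains_insert_self _ _ _
      · intro y hy
        rw [← PySem.Dict.contains_iff_mem_keys, PySem.Dict.contains_insert] at hy
        rcases Bool.or_eq_true_iff.mp hy with h1 | h1
        · have : y = k := by simpa using h1
          omega
        · have : y ∈ d.keys := by rw [← PySem.Dict.contains_iff_mem_keys]; exact h1
          exact le_trans (hmax y this) hle
    · simp only [hle, if_false]
      refine ⟨?_, ?_, ?_⟩
      · rw [PySem.Dict.get?_insert_of_ne _ _ (by omega : b.1 ≠ k)]
        exact hget
      · rw [← PySem.Dict.contains_iff_mem_keys, PySem.Dict.contains_insert]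
        rw [← PySem.Dict.contains_iff_mem_keys] at hmem
        simp [hmem]
      · intro y hy
        rw [← PySem.Dict.contains_iff_mem_keys, PySem.Dict.contains_insert] at hy
        rcases Bool.or_eq_true_iff.mp hy with h1 | h1
        · have : y = k := by simpa using h1
          omega
        · have : y ∈ d.keys := by rw [← PySem.Dict.contains_iff_mem_keys]; exact h1
          exact hmax y this

-- A's and B's loops, run over any list of in-range cells, stay related
lemma pvLoop_rel (la lb : List Char) (hlen : la.length ≤ lb.length)
    (ps : List (Int × Int))
    (hps : ∀ p ∈ ps, ∃ a b : Nat, p = ((a : Int), (b : Int)) ∧ a ≤ b ∧ b < la.length) :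
    ∀ (st : PySem.Dict (Int × Int) Int × PySem.Dict (Int × Int) Int × PySem.Dict Int (Int × Int))
      (best : Option (Int × (Int × Int))),
      pvInvF la lb st.1 → pvInvR la lb st.2.1 → pvInvB st.2.2 best →
      pvInvF la lb (ps.foldl (fun st p =>
          let fr := forwStep la lb st.1 p.1 p.2
          let rr := revStep la lb st.2.1 p.1 p.2
          (fr.2, rr.2, st.2.2.insert (fr.1 - rr.1) (p.1, p.2))) st).1 ∧
      pvInvR la lb (ps.foldl (fun st p =>
          let fr := forwStep la lb st.1 p.1 p.2
          let rr := revStep la lb st.2.1 p.1 p.2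
          (fr.2, rr.2, st.2.2.insert (fr.1 - rr.1) (p.1, p.2))) st).2.1 ∧
      pvInvB (ps.foldl (fun st p =>
          let fr := forwStep la lb st.1 p.1 p.2
          let rr := revStep la lb st.2.1 p.1 p.2
          (fr.2, rr.2, st.2.2.insert (fr.1 - rr.1) (p.1, p.2))) st).2.2
        (ps.foldl (fun best p =>
          let k := (PySem.List.pyRange 0 (p.2 - p.1 + 1) 1).foldl
            (fun k t =>
              k + ((if pvGet la (p.1 + t) ≠ pvGet lb (p.1 + t) then 1 else 0)
                   - (if pvGet la (p.1 + t) ≠ pvGet lb (p.2 - t) then 1 else 0))) 0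
          match best with
          | none => some (k, (p.1, p.2))
          | some b => if b.1 ≤ k then some (k, (p.1, p.2)) else some b) best) := by
  revert hps
  induction ps with
  | nil => intro _ st best hF hR hB; exact ⟨hF, hR, hB⟩
  | cons p ps ih =>
    intro hps st best hF hR hB
    obtain ⟨a, b, rfl, hab, hb⟩ := hps p (by simp)
    have hfw := pvForwStep_eq la lb st.1 a b hab hb hlen hF
    have hrv := pvRevStep_eq la lb st.2.1 a b hab hb hlen hR
    simp only [List.foldl_cons, hfw, hrv, pvKB_eq la lb a b hab]
    exact ih (fun q hq => hps q (List.mem_cons_of_mem _ hq)) _ _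
      (pvInvF_insert la lb st.1 a b hab hb hF)
      (pvInvR_insert la lb st.2.1 a b hab hb hR)
      (pvInvB_step st.2.2 best (pvFw la lb a b - pvRv la lb a b) ((a : Int), (b : Int)) hB)

-- cells produced by the double loop are in-range index pairs
lemma pvCells_shape (n : Nat) (p : Int × Int)
    (hp : p ∈ (PySem.List.pyRange 0 (n : Int) 1).flatMap
      (fun i => (PySem.List.pyRange i (n : Int) 1).map (fun j => (i, j)))) :
    ∃ a b : Nat, p = ((a : Int), (b : Int)) ∧ a ≤ b ∧ b < n := by
  simp only [List.mem_flatMap, List.mem_map] at hp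
  obtain ⟨i, hi, j, hj, rfl⟩ := hp
  rw [PySem.List.mem_pyRange_one] at hi hj
  refine ⟨i.toNat, j.toNat, ?_, by omega, by omega⟩
  rw [Int.toNat_of_nonneg (by omega), Int.toNat_of_nonneg (by omega)]

-- ===== VERDICT (by name: the statement is the Claim_ definition above) =====
theorem fun_py_spec : Claim_equal_fun_py := by
  intro A B C _ hpre
  obtain ⟨-, hlen⟩ := hpre
  unfold Spec_fun_py fun_py fun_py_alt
  dsimp only
  rw [pvFoldlNested (l := PySem.List.pyRange 0 (A.toList.length : Int) 1)
        (g := fun i => PySem.List.pyRange i (A.toList.length : Int) 1)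
        (f := fun st (i j : Int) =>
          (let fr := forwStep A.toList B.toList st.1 i j
           let rr := revStep A.toList B.toList st.2.1 i j
           ((fr.2, rr.2, st.2.2.insert (fr.1 - rr.1) (i, j)) :
            PySem.Dict (Int × Int) Int × PySem.Dict (Int × Int) Int × PySem.Dict Int (Int × Int))))]
  rw [pvFoldlNested (l := PySem.List.pyRange 0 (A.toList.length : Int) 1)
        (g := fun i => PySem.List.pyRange i (A.toList.length : Int) 1)
        (f := fun (best : Option (Int × (Int × Int))) (i j : Int) =>
          (let k := (PySem.List.pyRange 0 (j - i + 1) 1).foldl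
            (fun k t =>
              k + ((if pvGet A.toList (i + t) ≠ pvGet B.toList (i + t) then 1 else 0)
                   - (if pvGet A.toList (i + t) ≠ pvGet B.toList (j - t) then 1 else 0))) 0
           match best with
           | none => some (k, (i, j))
           | some b => if b.1 ≤ k then some (k, (i, j)) else some b))]
  have hF0 : pvInvF A.toList B.toList PySem.Dict.empty := by
    intro p v h
    simp [PySem.Dict.empty, PySem.Dict.get?] at h
  have hR0 : pvInvR A.toList B.toList PySem.Dict.empty := by
    intro p v h
    simp [PySem.Dict.empty, PySem.Dict.get?] at h
  have hB0 : pvInvB PySem.Dict.empty none := rfl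
  obtain ⟨hF, hR, hB⟩ := pvLoop_rel A.toList B.toList hlen
    ((PySem.List.pyRange 0 (A.toList.length : Int) 1).flatMap
      (fun i => (PySem.List.pyRange i (A.toList.length : Int) 1).map (fun j => (i, j))))
    (pvCells_shape A.toList.length)
    (PySem.Dict.empty, PySem.Dict.empty, PySem.Dict.empty) none hF0 hR0 hB0
  unfold pvInvB at hB
  split at hB
  next heq =>
    rw [heq, hB]
    rfl
  next b heq =>
    rw [heq]
    obtain ⟨hget, hmem, hmax⟩ := hB
    cases hmq : PySem.List.max?
        (((PySem.List.pyRange 0 (A.toList.length : Int) 1).flatMap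
          (fun i => (PySem.List.pyRange i (A.toList.length : Int) 1).map (fun j => (i, j)))).foldl
          (fun st p =>
            let fr := forwStep A.toList B.toList st.1 p.1 p.2
            let rr := revStep A.toList B.toList st.2.1 p.1 p.2
            (fr.2, rr.2, st.2.2.insert (fr.1 - rr.1) (p.1, p.2)))
          (PySem.Dict.empty, PySem.Dict.empty, PySem.Dict.empty)).2.2.keys (fun x => x) with
    | none =>
      rw [PySem.List.max?_eq_none_iff] at hmq
      rw [hmq] at hmem
      cases hmem
    | some m =>
      have hm_mem := PySem.List.max?_mem hmq
      have hmax2 := PySem.List.max?_isMax hmq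
      have hmb : m = b.1 := le_antisymm (hmax m hm_mem) (hmax2 b.1 hmem)
      subst hmb
      have hgd : (((PySem.List.pyRange 0 (A.toList.length : Int) 1).flatMap
          (fun i => (PySem.List.pyRange i (A.toList.length : Int) 1).map (fun j => (i, j)))).foldl
          (fun st p =>
            let fr := forwStep A.toList B.toList st.1 p.1 p.2
            let rr := revStep A.toList B.toList st.2.1 p.1 p.2
            (fr.2, rr.2, st.2.2.insert (fr.1 - rr.1) (p.1, p.2)))
          (PySem.Dict.empty, PySem.Dict.empty, PySem.Dict.empty)).2.2.getD b.1 (0, 0) = b.2 := by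
        rw [PySem.Dict.getD_eq_get?_getD, hget]
        rfl
      dsimp only
      rw [hgd]
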